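-- pv_equiv track=rewrite | github.com/thejarlid/VibeDining | src/chroma_indexer.py | _group_atmosphere_tags
-- ===== SOURCE A (Python) =====
-- from typing import Dict, List
--
-- def _group_atmosphere_tags(atmosphere_tags: List[str]) -> Dict[str, List[str]]:
--     feature_groups = {
--         "dining_options": [
--             "Dine-in", "Delivery", "Takeout", "Drive-through",
--             "Solo dining", "Family-friendly", "Good for kids"
--         ],
--         "accessibility": [
--             "Wheelchair accessible", "Gender-neutral restroom",
--             "Restroom", "Transgender safespace"
--         ],
--         "ambiance": [
--             "Casual", "Trendy", "Cozy", "Romantic", "Intimate",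
--             "Loud", "Quiet", "Usually a wait"
--         ],
--         "service_style": [
--             "Fast service", "Table service", "Self-service",
--             "Accepts reservations", "Dinner reservations recommended"
--         ],
--         "food_drink": [
--             "Alcohol", "Beer", "Wine", "Coffee", "Comfort food",
--             "Healthy options", "Small plates", "Lunch", "Dinner", "Dessert"
--         ],
--         "logistics": [
--             "Paid street parking", "Parking lot", "Credit cards",
--             "Debit cards", "NFC mobile payments"
--         ],
--         "crowd": [
--             "LGBTQ+ friendly", "Locals", "Identifies as Asian-owned"
--         ]
--     }
--
--     grouped_tags = {group: [] for group in feature_groups.keys()}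
--     ungrouped = []
--
--     for tag in atmosphere_tags:
--         placed = False
--         for group_name, group_tags in feature_groups.items():
--             if any(group_tag.lower() in tag.lower() for group_tag in group_tags):
--                 grouped_tags[group_name].append(tag)
--                 placed = True
--                 break
--
--         if not placed:
--             ungrouped.append(tag)
--
--     # Add ungrouped tags as misc
--     if ungrouped:
--         grouped_tags["other_features"] = ungrouped
--
--     # Remove empty groups
--     return {k: v for k, v in grouped_tags.items() if v}
-- ===== SOURCE B (Python) =====
-- from typing import Dict, List
--
-- FEATURE_GROUPS = [
--     ("dining_options", [
--         "Dine-in", "Delivery", "Takeout", "Drive-through",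
--         "Solo dining", "Family-friendly", "Good for kids"
--     ]),
--     ("accessibility", [
--         "Wheelchair accessible", "Gender-neutral restroom",
--         "Restroom", "Transgender safespace"
--     ]),
--     ("ambiance", [
--         "Casual", "Trendy", "Cozy", "Romantic", "Intimate",
--         "Loud", "Quiet", "Usually a wait"
--     ]),
--     ("service_style", [
--         "Fast service", "Table service", "Self-service",
--         "Accepts reservations", "Dinner reservations recommended"
--     ]),
--     ("food_drink", [
--         "Alcohol", "Beer", "Wine", "Coffee", "Comfort food",
--         "Healthy options", "Small plates", "Lunch", "Dinner", "Dessert"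
--     ]),
--     ("logistics", [
--         "Paid street parking", "Parking lot", "Credit cards",
--         "Debit cards", "NFC mobile payments"
--     ]),
--     ("crowd", [
--         "LGBTQ+ friendly", "Locals", "Identifies as Asian-owned"
--     ]),
-- ]
--
--
-- def _matches(keywords: List[str], tag: str) -> bool:
--     low = tag.lower()
--     return any(k.lower() in low for k in keywords)
--
--
-- def _group_atmosphere_tags(atmosphere_tags: List[str]) -> Dict[str, List[str]]:
--     # Group-major: for each group in declaration order, collect the tags whose
--     # FIRST matching group it is (no earlier group matches); leftovers go last.
--     result = {}
--     for i, (name, keywords) in enumerate(FEATURE_GROUPS):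
--         bucket = [t for t in atmosphere_tags
--                   if _matches(keywords, t)
--                   and not any(_matches(kws, t) for _, kws in FEATURE_GROUPS[:i])]
--         if bucket:
--             result[name] = bucket
--     others = [t for t in atmosphere_tags
--               if not any(_matches(kws, t) for _, kws in FEATURE_GROUPS)]
--     if others:
--         result["other_features"] = others
--     return result
-- ===== Notes on version B (the rewrite author's own statement) =====
-- stated objective: alternative
-- what changed: Inverted the nesting to group-major: B builds each group's bucket with one comprehension over all tags (keeping a tag only if no earlier group matches it) and appends the leftovers last, instead of A's tag-major loop that mutates a pre-initialised dict and breaks on the first matching group.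
import Mathlib
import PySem

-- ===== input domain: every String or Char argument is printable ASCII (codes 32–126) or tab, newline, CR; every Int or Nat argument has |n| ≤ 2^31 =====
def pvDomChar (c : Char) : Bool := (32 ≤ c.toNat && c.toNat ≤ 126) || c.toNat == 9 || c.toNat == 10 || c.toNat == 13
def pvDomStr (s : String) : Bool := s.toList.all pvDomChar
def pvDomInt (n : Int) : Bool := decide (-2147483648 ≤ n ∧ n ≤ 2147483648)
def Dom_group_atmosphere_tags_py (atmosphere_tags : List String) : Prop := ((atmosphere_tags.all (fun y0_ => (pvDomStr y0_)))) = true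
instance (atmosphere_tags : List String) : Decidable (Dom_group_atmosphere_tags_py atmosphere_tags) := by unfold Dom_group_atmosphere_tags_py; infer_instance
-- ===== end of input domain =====

-- B buckets the tags group-major (one comprehension per group, first-matching-group-wins)
-- instead of A's tag-major loop over a mutable dict with break; objective: alternative decomposition.

-- ===== PORT A =====
-- the feature_groups dict literal (insertion order); Source B declares the same pairs as a module list
def pvFeatureGroups : List (String × List String) :=
  [("dining_options",
    ["Dine-in", "Delivery", "Takeout", "Drive-through",
     "Solo dining", "Family-friendly", "Good for kids"]),
   ("accessibility",
    ["Wheelchair accessible", "Gender-neutral restroom",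
     "Restroom", "Transgender safespace"]),
   ("ambiance",
    ["Casual", "Trendy", "Cozy", "Romantic", "Intimate",
     "Loud", "Quiet", "Usually a wait"]),
   ("service_style",
    ["Fast service", "Table service", "Self-service",
     "Accepts reservations", "Dinner reservations recommended"]),
   ("food_drink",
    ["Alcohol", "Beer", "Wine", "Coffee", "Comfort food",
     "Healthy options", "Small plates", "Lunch", "Dinner", "Dessert"]),
   ("logistics",
    ["Paid street parking", "Parking lot", "Credit cards",
     "Debit cards", "NFC mobile payments"]),
   ("crowd",
    ["LGBTQ+ friendly", "Locals", "Identifies as Asian-owned"])]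

-- A's inner 'for group_name, group_tags in feature_groups.items(): … break' loop:
-- first group whose keywords match (substring on lowercased strings), none if unplaced
def pvPlace (tag : String) : List (String × List String) → Option String
  | [] => none
  | g :: rest =>
    if g.2.any (fun gt => PySem.Str.isIn (PySem.Str.lower gt) (PySem.Str.lower tag))
    then some g.1 else pvPlace tag rest

def group_atmosphere_tags_py (atmosphere_tags : List String) : List (String × List String) :=
  -- grouped_tags = {group: [] for group in feature_groups.keys()}; ungrouped = []
  let init : PySem.Dict String (List String) :=
    PySem.Dict.ofList (pvFeatureGroups.map (fun p => (p.1, ([] : List String))))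
  let st := atmosphere_tags.foldl
    (fun (st : PySem.Dict String (List String) × List String) tag =>
      match pvPlace tag pvFeatureGroups with
      | some g => (st.1.modify g [] (fun v => v ++ [tag]), st.2)   -- grouped_tags[g].append(tag)
      | none   => (st.1, st.2 ++ [tag]))                           -- ungrouped.append(tag)
    (init, [])
  let grouped := if st.2.isEmpty then st.1 else st.1.insert "other_features" st.2
  (grouped.items).filter (fun p => !p.2.isEmpty)   -- {k: v for k, v in … if v}

-- ===== PORT B =====
def pvMatches (keywords : List String) (tag : String) : Bool :=
  let low := PySem.Str.lower tag
  keywords.any (fun k => PySem.Str.isIn (PySem.Str.lower k) low)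

def group_atmosphere_tags_py_alt (atmosphere_tags : List String) : List (String × List String) :=
  let result := (PySem.List.enumerate pvFeatureGroups).foldl
    (fun result e =>
      let bucket := atmosphere_tags.filter (fun t =>
        pvMatches e.2.2 t &&
          !((pvFeatureGroups.take e.1.toNat).any (fun q => pvMatches q.2 t)))
      if !bucket.isEmpty then result ++ [(e.2.1, bucket)] else result)
    []
  let others := atmosphere_tags.filter (fun t =>
    !(pvFeatureGroups.any (fun q => pvMatches q.2 t)))
  if !others.isEmpty then result ++ [("other_features", others)] else result

-- ===== PRECONDITION & SPEC =====
def Spec_group_atmosphere_tags_py (atmosphere_tags : List String) (out : List (String × List String)) : Prop := out = group_atmosphere_tags_py_alt atmosphere_tags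
instance (atmosphere_tags : List String) (out : List (String × List String)) : Decidable (Spec_group_atmosphere_tags_py atmosphere_tags out) := by unfold Spec_group_atmosphere_tags_py; infer_instance

-- ===== CLAIM (what is proved, stated in full; the proofs are below) =====
def Claim_equal_group_atmosphere_tags_py : Prop := ∀ (atmosphere_tags : List String), Dom_group_atmosphere_tags_py atmosphere_tags → Spec_group_atmosphere_tags_py atmosphere_tags (group_atmosphere_tags_py atmosphere_tags)

-- ===== LEMMAS AND PROOFS =====

-- the bucket of group g, characterised per tag: tags whose FIRST matching group is g
def pvBucket (atmosphere_tags : List String) (g : String) : List String :=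
  atmosphere_tags.filter (fun t => pvPlace t pvFeatureGroups == some g)

def pvOthers (atmosphere_tags : List String) : List String :=
  atmosphere_tags.filter (fun t => (pvPlace t pvFeatureGroups).isNone)

lemma pvPlace_mem (t : String) (L : List (String × List String)) (x : String)
    (h : pvPlace t L = some x) : x ∈ L.map Prod.fst := by
  induction L with
  | nil => simp [pvPlace] at h
  | cons g rest ih =>
    rw [pvPlace] at h
    split at h
    · simp at h; simp [h]
    · simp [ih h]

lemma pvPlace_cond (t : String) (g : String × List String) (rest : List (String × List String)) :
    pvPlace t (g :: rest) = if pvMatches g.2 t then some g.1 else pvPlace t rest := rfl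

-- B's per-group test (matches this group ∧ no earlier group) = first-matching-group-wins
lemma pv_test_gen (t : String) (L : List (String × List String)) (i : Nat) (hi : i < L.length)
    (hnd : (L.map Prod.fst).Nodup) :
    (pvMatches (L[i].2) t && !((L.take i).any (fun q => pvMatches q.2 t)))
      = (pvPlace t L == some (L[i].1)) := by
  induction L generalizing i with
  | nil => simp at hi
  | cons g rest ih =>
    rw [pvPlace_cond]
    cases i with
    | zero =>
      simp only [List.getElem_cons_zero, List.take_zero, List.any_nil, Bool.not_false, Bool.and_true]
      cases hm : pvMatches g.2 t with
      | true => simp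
      | false =>
        simp only [Bool.false_eq_true, if_false]
        cases hp : pvPlace t rest with
        | none => simp
        | some x =>
          have hx := pvPlace_mem t rest x hp
          simp only [List.map_cons, List.nodup_cons] at hnd
          have : x ≠ g.1 := by rintro rfl; exact hnd.1 hx
          simp [this]
    | succ j =>
      simp only [List.getElem_cons_succ, List.take_succ_cons, List.any_cons]
      simp only [List.map_cons, List.nodup_cons] at hnd
      have hj : j < rest.length := by simpa using hi
      cases hm : pvMatches g.2 t with
      | true =>
        have hne : (rest[j].1) ≠ g.1 := by
          intro h
          exact hnd.1 (h ▸ List.mem_map_of_mem (l := rest) (List.getElem_mem hj))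
        simp [hne.symm]
      | false =>
        simp only [Bool.false_eq_true, if_false, Bool.false_or]
        exact ih j hj hnd.2

lemma pv_others_gen (t : String) (L : List (String × List String)) :
    (!(L.any (fun q => pvMatches q.2 t))) = (pvPlace t L).isNone := by
  induction L with
  | nil => simp [pvPlace]
  | cons g rest ih =>
    rw [pvPlace_cond]
    cases hm : pvMatches g.2 t with
    | true =>
      simp only [List.any_cons, hm, Bool.true_or, Bool.not_true, if_true, Option.isNone_some]
    | false =>
      simp only [List.any_cons, hm, Bool.false_eq_true, if_false, Bool.false_or]
      exact ih

-- A's loop, split into its two independent components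
lemma pv_foldA (tags : List String) (D : PySem.Dict String (List String)) (U : List String) :
    tags.foldl
      (fun (st : PySem.Dict String (List String) × List String) tag =>
        match pvPlace tag pvFeatureGroups with
        | some g => (st.1.modify g [] (fun v => v ++ [tag]), st.2)
        | none   => (st.1, st.2 ++ [tag])) (D, U)
    = (tags.foldl
        (fun D tag =>
          match pvPlace tag pvFeatureGroups with
          | some g => D.modify g [] (fun v => v ++ [tag])
          | none   => D) D,
       U ++ tags.filter (fun t => (pvPlace t pvFeatureGroups).isNone)) := by
  induction tags generalizing D U with
  | nil => simp
  | cons t ts ih =>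
    simp only [List.foldl_cons, List.filter_cons]
    cases pvPlace t pvFeatureGroups <;> simp [ih]

def pvPairs (tags : List String) : List (String × String) :=
  tags.filterMap (fun t => (pvPlace t pvFeatureGroups).map (fun g => (g, t)))

lemma pv_foldD (tags : List String) (D : PySem.Dict String (List String)) :
    tags.foldl
      (fun D tag =>
        match pvPlace tag pvFeatureGroups with
        | some g => D.modify g [] (fun v => v ++ [tag])
        | none   => D) D
    = (pvPairs tags).foldl (fun d p => d.modify p.1 [] (fun v => v ++ [p.2])) D := by
  induction tags generalizing D with
  | nil => rfl
  | cons t ts ih =>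
    simp only [pvPairs, List.filterMap_cons, List.foldl_cons]
    cases pvPlace t pvFeatureGroups <;> simp [pvPairs, ih]

lemma pv_pairs_filter (tags : List String) (g : String) :
    ((pvPairs tags).filter (fun p => p.1 == g)).map (fun p => p.2) = pvBucket tags g := by
  induction tags with
  | nil => rfl
  | cons t ts ih =>
    simp only [pvPairs, pvBucket, List.filterMap_cons, List.filter_cons] at *
    cases hp : pvPlace t pvFeatureGroups with
    | none => simpa [hp] using ih
    | some x =>
      by_cases hx : x = g
      · subst hx; simpa [hp] using ih
      · simpa [hp, hx] using ih

lemma pv_items_eq (d : PySem.Dict String (List String)) (h : d.keys.Nodup) :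
    d.items = d.keys.map (fun k => (k, d.getD k [])) := by
  have hk : d.keys = d.items.map Prod.fst := by simp [PySem.Dict.keys]
  rw [hk, List.map_map]
  conv_lhs => rw [show d.items = d.items.map id from (List.map_id _).symm]
  refine List.map_eq_map_iff.mpr ?_
  intro p hp
  have hg : d.get? p.1 = some p.2 := PySem.Dict.get?_of_mem_items d (by simpa using hp) h
  simp [Function.comp, PySem.Dict.getD_of_get?_eq_some d [] hg]

lemma pv_set_update_of_subset (xs : List String) (s : PySem.Set String)
    (h : ∀ x ∈ xs, x ∈ s) : PySem.Set.update s xs = s := by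
  rw [PySem.Set.update_eq_append_filter]
  have hnil : List.filter (fun y => !s.contains y) (PySem.Set.ofList xs) = [] := by
    refine List.filter_eq_nil_iff.mpr ?_
    intro y hy
    have hys : y ∈ s := h y ((PySem.Set.mem_ofList xs y).mp hy)
    rw [(PySem.Set.contains_iff s y).mpr hys]
    simp
  rw [hnil, List.append_nil]

-- ===== VERDICT (by name: the statement is the Claim_ definition above) =====
theorem group_atmosphere_tags_py_spec : Claim_equal_group_atmosphere_tags_py := by
  intro tags _
  unfold Spec_group_atmosphere_tags_py group_atmosphere_tags_py group_atmosphere_tags_py_alt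
  simp only []
  rw [pv_foldA, pv_foldD]
  set D := (pvPairs tags).foldl (fun d p => d.modify p.1 [] (fun v => v ++ [p.2]))
      (PySem.Dict.ofList (pvFeatureGroups.map (fun p => (p.1, ([] : List String))))) with hD
  have hkeys : D.keys = pvFeatureGroups.map Prod.fst := by
    rw [hD, PySem.Dict.keys_foldl_modify_key (pvPairs tags) Prod.fst []
          (fun _ p => (fun v => v ++ [p.2]))]
    have h0 : (PySem.Dict.ofList (pvFeatureGroups.map (fun p => (p.1, ([] : List String))))).keys
        = pvFeatureGroups.map Prod.fst := by decide
    rw [h0]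
    apply pv_set_update_of_subset
    intro x hx
    obtain ⟨p, hp, rfl⟩ := List.mem_map.mp hx
    obtain ⟨t, ht, hpt⟩ := List.mem_filterMap.mp hp
    cases hpl : pvPlace t pvFeatureGroups with
    | none => rw [hpl] at hpt; simp at hpt
    | some g =>
      rw [hpl] at hpt
      simp only [Option.map_some, Option.some_inj] at hpt
      subst hpt
      exact pvPlace_mem t _ g hpl
  have hnd : D.keys.Nodup := by rw [hkeys]; decide
  have hinit : ∀ g : String,
      (PySem.Dict.ofList (pvFeatureGroups.map (fun p => (p.1, ([] : List String))))).getD g [] = [] := by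
    intro g
    by_cases hg : g ∈ (PySem.Dict.ofList (pvFeatureGroups.map (fun p => (p.1, ([] : List String))))).keys
    · have h7 : (PySem.Dict.ofList (pvFeatureGroups.map (fun p => (p.1, ([] : List String))))).keys
          = pvFeatureGroups.map Prod.fst := by decide
      rw [h7] at hg
      fin_cases hg <;> decide
    · refine PySem.Dict.getD_of_not_contains _ _ ?_
      rw [PySem.Dict.contains_eq_decide_mem_keys]
      simp [hg]
  have hgetD : ∀ g : String, D.getD g [] = pvBucket tags g := by
    intro g
    rw [hD, PySem.Dict.getD_foldl_modify_append, hinit g, List.nil_append, pv_pairs_filter]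
  have hitems : D.items = pvFeatureGroups.map (fun q => (q.1, pvBucket tags q.1)) := by
    rw [pv_items_eq D hnd, hkeys, List.map_map]
    refine List.map_eq_map_iff.mpr ?_
    intro p _
    simp [Function.comp, hgetD p.1]
  have hcont : D.contains "other_features" = false := by
    rw [PySem.Dict.contains_eq_decide_mem_keys, hkeys]; decide
  have hoth : List.filter (fun t => !pvFeatureGroups.any fun q => pvMatches q.2 t) tags
      = List.filter (fun t => (pvPlace t pvFeatureGroups).isNone) tags :=
    List.filter_congr (fun t _ => pv_others_gen t pvFeatureGroups)
  have hbkt : ∀ e ∈ PySem.List.enumerate pvFeatureGroups,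
      List.filter (fun t =>
        pvMatches e.2.2 t && !(List.take e.1.toNat pvFeatureGroups).any fun q => pvMatches q.2 t) tags
      = pvBucket tags e.2.1 := by
    intro e he
    obtain ⟨k, hk, rfl⟩ := (PySem.List.mem_enumerate_iff pvFeatureGroups 0 e).mp he
    have hidx : ((0 : Int) + (k : Int)).toNat = k := by simp
    unfold pvBucket
    rw [hidx]
    exact List.filter_congr (fun t _ => pv_test_gen t pvFeatureGroups k hk (by decide))
  simp only [List.nil_append]
  rw [hoth]
  simp only [PySem.List.foldl_append_if]
  have hfold :
      List.map (fun e => (e.2.1,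
          List.filter (fun t =>
            pvMatches e.2.2 t && !(List.take e.1.toNat pvFeatureGroups).any fun q => pvMatches q.2 t) tags))
        (List.filter (fun e =>
          !(List.filter (fun t =>
            pvMatches e.2.2 t && !(List.take e.1.toNat pvFeatureGroups).any fun q => pvMatches q.2 t) tags).isEmpty)
          (PySem.List.enumerate pvFeatureGroups))
      = List.map (fun e => ((e.2.1 : String), pvBucket tags e.2.1))
          (List.filter (fun e => !(pvBucket tags e.2.1).isEmpty)
            (PySem.List.enumerate pvFeatureGroups)) := by
    rw [List.filter_congr (fun e he => by rw [hbkt e he])]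
    refine List.map_eq_map_iff.mpr ?_
    intro e he
    rw [hbkt e (List.mem_of_mem_filter he)]
  rw [hfold]
  have hcore :
      List.map (fun e => ((e.2.1 : String), pvBucket tags e.2.1))
          (List.filter (fun e => !(pvBucket tags e.2.1).isEmpty)
            (PySem.List.enumerate pvFeatureGroups))
      = List.filter (fun p => !p.2.isEmpty)
          (List.map (fun q => (q.1, pvBucket tags q.1)) pvFeatureGroups) := by
    rw [List.filter_map]
    rw [show ((fun p => !p.2.isEmpty) ∘ (fun q : String × List String => (q.1, pvBucket tags q.1)))
          = (fun q : String × List String => !(pvBucket tags q.1).isEmpty) from rfl]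
    rw [← PySem.List.map_snd_enumerate pvFeatureGroups 0]
    rw [List.filter_map, List.map_map]
    rfl
  rw [hcore]
  by_cases hU : (List.filter (fun t => (pvPlace t pvFeatureGroups).isNone) tags).isEmpty
  · simp only [hU, if_true, Bool.not_true, Bool.false_eq_true, if_false, hitems, List.nil_append]
  · simp only [hU, Bool.not_false, if_true, Bool.false_eq_true, if_false]
    rw [PySem.Dict.items_insert_of_not_contains D _ hcont, List.filter_append, hitems]
    simp [hU]
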